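-- pv_equiv track=rewrite | github.com/wangchi0312/paper-ai-analyzer | paper_analyzer/fulltext/resolver.py | _rank_candidate_urls
-- ===== SOURCE A (Python) =====
-- MAX_CANDIDATES_PER_SOURCE = 1
--
-- MAX_DOWNLOAD_CANDIDATES = 4
--
-- SOURCE_PRIORITY = {
--     "publisher": 0,
--     "crossref_tdm": 1,
--     "unpaywall": 2,
--     "semantic_scholar": 3,
--     "openalex": 4,
--     "arxiv": 5,
--     "publisher_page": 6,
-- }
--
-- def _rank_candidate_urls(candidates: list[tuple[str, str]]) -> list[tuple[str, str]]:
--     seen_urls: set[str] = set()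
--     per_source_count: dict[str, int] = {}
--     unique: list[tuple[int, int, str, str]] = []
--     for order, (source, url) in enumerate(candidates):
--         if not url or url in seen_urls:
--             continue
--         if per_source_count.get(source, 0) >= MAX_CANDIDATES_PER_SOURCE:
--             continue
--         seen_urls.add(url)
--         per_source_count[source] = per_source_count.get(source, 0) + 1
--         unique.append((SOURCE_PRIORITY.get(source, 99), order, source, url))
--     unique.sort(key=lambda item: (item[0], item[1]))
--     return [(source, url) for _, _, source, url in unique[:MAX_DOWNLOAD_CANDIDATES]]
-- ===== SOURCE B (Python) =====
-- MAX_CANDIDATES_PER_SOURCE = 1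
--
-- MAX_DOWNLOAD_CANDIDATES = 4
--
-- SOURCE_PRIORITY = {
--     "publisher": 0,
--     "crossref_tdm": 1,
--     "unpaywall": 2,
--     "semantic_scholar": 3,
--     "openalex": 4,
--     "arxiv": 5,
--     "publisher_page": 6,
-- }
--
--
-- def _rank_candidate_urls(candidates: list[tuple[str, str]]) -> list[tuple[str, str]]:
--     # Bucket sort over the bounded priority domain instead of a comparison sort.
--     seen_urls: set[str] = set()
--     per_source_count: dict[str, int] = {}
--     buckets: dict[int, list[tuple[str, str]]] = {
--         p: [] for p in list(SOURCE_PRIORITY.values()) + [99]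
--     }
--     for source, url in candidates:
--         if not url or url in seen_urls:
--             continue
--         if per_source_count.get(source, 0) >= MAX_CANDIDATES_PER_SOURCE:
--             continue
--         seen_urls.add(url)
--         per_source_count[source] = per_source_count.get(source, 0) + 1
--         buckets[SOURCE_PRIORITY.get(source, 99)].append((source, url))
--     ranked: list[tuple[str, str]] = []
--     for p in sorted(buckets):
--         ranked += buckets[p]
--     return ranked[:MAX_DOWNLOAD_CANDIDATES]
-- ===== Notes on version B (the rewrite author's own statement) =====
-- stated objective: alternative
-- what changed: The comparison sort of (priority, order) tuples is replaced by a bucket/counting sort: surviving (source, url) pairs are appended into per-priority buckets over the fixed priority domain {0..6, 99} and the buckets are concatenated in ascending priority order, preserving scan order within each bucket.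
import Mathlib
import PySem

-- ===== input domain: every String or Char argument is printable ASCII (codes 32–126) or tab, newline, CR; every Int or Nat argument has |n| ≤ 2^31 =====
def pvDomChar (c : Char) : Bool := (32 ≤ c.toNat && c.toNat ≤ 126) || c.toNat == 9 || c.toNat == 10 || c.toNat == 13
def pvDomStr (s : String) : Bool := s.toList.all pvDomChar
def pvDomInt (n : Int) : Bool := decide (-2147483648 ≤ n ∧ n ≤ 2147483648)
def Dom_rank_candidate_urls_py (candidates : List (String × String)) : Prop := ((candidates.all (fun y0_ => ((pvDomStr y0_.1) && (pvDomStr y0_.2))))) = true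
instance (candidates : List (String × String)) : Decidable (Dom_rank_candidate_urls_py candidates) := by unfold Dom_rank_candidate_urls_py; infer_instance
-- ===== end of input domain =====

-- B replaces A's comparison sort of (priority, order) tuples by a bucket sort over the
-- fixed priority domain {0..6, 99} (objective: alternative algorithm, same filtering pass).

-- ===== PORT A =====
def MAX_CANDIDATES_PER_SOURCE : Int := 1

def MAX_DOWNLOAD_CANDIDATES : Int := 4

def SOURCE_PRIORITY : PySem.Dict String Int := PySem.Dict.ofList
  [("publisher", 0), ("crossref_tdm", 1), ("unpaywall", 2), ("semantic_scholar", 3),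
   ("openalex", 4), ("arxiv", 5), ("publisher_page", 6)]

-- the body of A's 'for order, (source, url) in enumerate(candidates)' loop
def pvStepA (st : PySem.Set String × PySem.Dict String Int × List (Int × Int × String × String))
    (oc : Int × String × String) :
    PySem.Set String × PySem.Dict String Int × List (Int × Int × String × String) :=
  let order := oc.1
  let source := oc.2.1
  let url := oc.2.2
  if url == "" || PySem.Set.contains st.1 url then st           -- 'if not url or url in seen_urls: continue'
  else if st.2.1.getD source 0 ≥ MAX_CANDIDATES_PER_SOURCE then st
  else (PySem.Set.add st.1 url,
        st.2.1.insert source (st.2.1.getD source 0 + 1),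
        st.2.2 ++ [(SOURCE_PRIORITY.getD source 99, order, source, url)])

def rank_candidate_urls_py (candidates : List (String × String)) : List (String × String) :=
  let st := (PySem.List.enumerate candidates).foldl pvStepA
    (PySem.Set.empty, PySem.Dict.empty, [])
  let uniqueSorted := PySem.List.sorted2 st.2.2 (fun item => item.1) (fun item => item.2.1)
  (PySem.List.slice uniqueSorted none (some MAX_DOWNLOAD_CANDIDATES)).map
    (fun t => (t.2.2.1, t.2.2.2))

-- ===== PORT B =====
-- B's initial buckets dict: '{p: [] for p in list(SOURCE_PRIORITY.values()) + [99]}'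
def pvBuckets0 : PySem.Dict Int (List (String × String)) :=
  PySem.Dict.ofList ((SOURCE_PRIORITY.values ++ [99]).map (fun p => (p, [])))

-- the body of B's 'for source, url in candidates' loop; 'buckets[p].append(pair)' on an
-- always-present key p is Dict.modify p [] (· ++ [pair])
def pvStepB (st : PySem.Set String × PySem.Dict String Int × PySem.Dict Int (List (String × String)))
    (c : String × String) :
    PySem.Set String × PySem.Dict String Int × PySem.Dict Int (List (String × String)) :=
  let source := c.1
  let url := c.2
  if url == "" || PySem.Set.contains st.1 url then st
  else if st.2.1.getD source 0 ≥ MAX_CANDIDATES_PER_SOURCE then st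
  else (PySem.Set.add st.1 url,
        st.2.1.insert source (st.2.1.getD source 0 + 1),
        st.2.2.modify (SOURCE_PRIORITY.getD source 99) [] (fun l => l ++ [(source, url)]))

def rank_candidate_urls_py_alt (candidates : List (String × String)) : List (String × String) :=
  let st := candidates.foldl pvStepB (PySem.Set.empty, PySem.Dict.empty, pvBuckets0)
  let ranked := (PySem.List.sorted (PySem.Dict.keys st.2.2) (fun p => p) false).foldl
    (fun acc p => acc ++ st.2.2.getD p []) []
  PySem.List.slice ranked none (some MAX_DOWNLOAD_CANDIDATES)

-- ===== PRECONDITION & SPEC =====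
def Spec_rank_candidate_urls_py (candidates : List (String × String)) (out : List (String × String)) : Prop := out = rank_candidate_urls_py_alt candidates
instance (candidates : List (String × String)) (out : List (String × String)) : Decidable (Spec_rank_candidate_urls_py candidates out) := by unfold Spec_rank_candidate_urls_py; infer_instance

-- ===== CLAIM (what is proved, stated in full; the proofs are below) =====
def Claim_equal_rank_candidate_urls_py : Prop := ∀ (candidates : List (String × String)), Dom_rank_candidate_urls_py candidates → Spec_rank_candidate_urls_py candidates (rank_candidate_urls_py candidates)

-- ===== LEMMAS AND PROOFS =====

-- the fixed priority domain, in ascending order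
def pvL8 : List Int := [0, 1, 2, 3, 4, 5, 6, 99]

-- the lexicographic 'before' relation used by sorted2 with keys (.1), (.2.1)
def pvBefore (a b : Int × Int × String × String) : Bool :=
  decide (a.1 < b.1) || (!decide (b.1 < a.1) && decide (a.2.1 < b.2.1))

lemma pvSP_eq : SOURCE_PRIORITY = PySem.Dict.mk
  [("publisher", 0), ("crossref_tdm", 1), ("unpaywall", 2), ("semantic_scholar", 3),
   ("openalex", 4), ("arxiv", 5), ("publisher_page", 6)] := by decide

lemma pvB0_eq : pvBuckets0 = PySem.Dict.mk
  [((0:Int), ([]:List (String × String))), (1, []), (2, []), (3, []), (4, []), (5, []), (6, []), (99, [])] := by decide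

lemma pvPrio_mem (s : String) : SOURCE_PRIORITY.getD s 99 ∈ pvL8 := by
  rw [pvSP_eq]
  simp [PySem.Dict.getD_eq_get?_getD, PySem.Dict.get?_mk_cons, pvL8]
  split_ifs <;> simp [PySem.Dict.get?]

lemma pvBuckets0_getD (p : Int) : pvBuckets0.getD p [] = [] := by
  rw [pvB0_eq]
  simp [PySem.Dict.getD_eq_get?_getD, PySem.Dict.get?_mk_cons]
  split_ifs <;> simp [PySem.Dict.get?]

lemma pvBuckets0_keys : PySem.Dict.keys pvBuckets0 = pvL8 := by decide

lemma pvInsertBy_split (x : Int × Int × String × String)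
    (l1 l2 : List (Int × Int × String × String))
    (h1 : ∀ y ∈ l1, pvBefore x y = false) (h2 : ∀ y ∈ l2, pvBefore x y = true) :
    PySem.List.insertBy pvBefore x (l1 ++ l2) = l1 ++ x :: l2 := by
  induction l1 with
  | nil =>
    simp only [List.nil_append]
    cases l2 with
    | nil => rfl
    | cons y ys =>
      have := h2 y (by simp)
      simp [PySem.List.insertBy, this]
  | cons y ys ih =>
    have hy := h1 y (by simp)
    simp [PySem.List.insertBy, hy]
    exact ih (fun z hz => h1 z (by simp [hz]))

lemma pvSorted2_snoc (us : List (Int × Int × String × String)) (x : Int × Int × String × String) :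
    PySem.List.sorted2 (us ++ [x]) (fun t => t.1) (fun t => t.2.1) =
      PySem.List.insertBy pvBefore x (PySem.List.sorted2 us (fun t => t.1) (fun t => t.2.1)) := by
  simp only [PySem.List.sorted2, List.foldl_append]; rfl

lemma pvSorted2_eq_flatMap (us : List (Int × Int × String × String))
    (hp : us.Pairwise (fun a b => a.2.1 < b.2.1))
    (hP : ∀ t ∈ us, t.1 ∈ pvL8) :
    PySem.List.sorted2 us (fun t => t.1) (fun t => t.2.1) =
      pvL8.flatMap (fun p => us.filter (fun t => t.1 == p)) := by
  induction us using List.reverseRecOn with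
  | nil => simp [PySem.List.sorted2]
  | append_singleton us x ih =>
    rw [List.pairwise_append] at hp
    obtain ⟨hp_us, -, h_all⟩ := hp
    have hall : ∀ a ∈ us, a.2.1 < x.2.1 := fun a ha => h_all a ha x (by simp)
    -- split pvL8 at q := x.1
    obtain ⟨P1, P2, hsplit⟩ := List.append_of_mem (hP x (by simp))
    have hL8pw : pvL8.Pairwise (· < ·) := by decide
    rw [hsplit] at hL8pw
    rw [List.pairwise_append] at hL8pw
    have hP1 : ∀ p ∈ P1, p < x.1 := fun p hpm => hL8pw.2.2 p hpm x.1 (by simp)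
    have hP2 : ∀ p ∈ P2, x.1 < p := fun p hpm => (List.pairwise_cons.mp hL8pw.2.1).1 p hpm
    have ihe := ih hp_us (fun t ht => hP t (by simp [ht]))
    rw [pvSorted2_snoc, ihe, hsplit]
    rw [List.flatMap_append, List.flatMap_cons, ← List.append_assoc]
    rw [pvInsertBy_split x _ (List.flatMap (fun p => us.filter (fun t => t.1 == p)) P2)
      (by
        intro y hy
        simp only [List.mem_append, List.mem_flatMap, List.mem_filter] at hy
        rcases hy with ⟨p, hpm, hy, hq⟩ | ⟨hy, hq⟩
        · have h1 : y.1 = p := by simpa using hq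
          have h2 : p < x.1 := hP1 p hpm
          simp [pvBefore]
          constructor
          · omega
          · intro; omega
        · have h1 : y.1 = x.1 := by simpa using hq
          have h2 : y.2.1 < x.2.1 := hall y hy
          simp [pvBefore]
          constructor
          · omega
          · intro; omega)
      (by
        intro y hy
        simp only [List.mem_flatMap, List.mem_filter] at hy
        obtain ⟨p, hpm, hy, hq⟩ := hy
        have h1 : y.1 = p := by simpa using hq
        have h2 : x.1 < p := hP2 p hpm
        simp [pvBefore]
        omega)]
    -- now massage RHS: filters of (us ++ [x])
    have hfil : ∀ p : Int, (us ++ [x]).filter (fun t => t.1 == p) =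
        us.filter (fun t => t.1 == p) ++ (if x.1 = p then [x] else []) := by
      intro p
      rw [List.filter_append, List.filter_singleton]
      by_cases h : x.1 = p
      · simp [h]
      · have hb : (x.1 == p) = false := beq_eq_false_iff_ne.mpr h
        simp [hb, h]
    have hcongr1 : List.flatMap (fun p => (us ++ [x]).filter (fun t => t.1 == p)) P1 =
        List.flatMap (fun p => us.filter (fun t => t.1 == p)) P1 := by
      apply List.flatMap_congr
      intro p hpm
      rw [hfil p]
      have : ¬ x.1 = p := by have := hP1 p hpm; omega
      simp [this]
    have hcongr2 : List.flatMap (fun p => (us ++ [x]).filter (fun t => t.1 == p)) P2 =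
        List.flatMap (fun p => us.filter (fun t => t.1 == p)) P2 := by
      apply List.flatMap_congr
      intro p hpm
      rw [hfil p]
      have : ¬ x.1 = p := by have := hP2 p hpm; omega
      simp [this]
    rw [List.flatMap_append, List.flatMap_cons, hcongr1, hcongr2, hfil x.1]
    simp

lemma pvLoop_rel (cs : List (String × String)) (n : Int) (seen : PySem.Set String)
    (per : PySem.Dict String Int) (unique : List (Int × Int × String × String))
    (buckets : PySem.Dict Int (List (String × String)))
    (hb : ∀ p, buckets.getD p [] = (unique.filter (fun t => t.1 == p)).map (fun t => t.2.2))
    (hk : PySem.Dict.keys buckets = pvL8)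
    (ho : ∀ t ∈ unique, t.2.1 < n)
    (hp : unique.Pairwise (fun a b => a.2.1 < b.2.1))
    (hP : ∀ t ∈ unique, t.1 ∈ pvL8) :
    (∀ p, (cs.foldl pvStepB (seen, per, buckets)).2.2.getD p [] =
      (((PySem.List.enumerate cs n).foldl pvStepA (seen, per, unique)).2.2.filter
        (fun t => t.1 == p)).map (fun t => t.2.2)) ∧
    PySem.Dict.keys (cs.foldl pvStepB (seen, per, buckets)).2.2 = pvL8 ∧
    ((PySem.List.enumerate cs n).foldl pvStepA (seen, per, unique)).2.2.Pairwise
      (fun a b => a.2.1 < b.2.1) ∧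
    (∀ t ∈ ((PySem.List.enumerate cs n).foldl pvStepA (seen, per, unique)).2.2, t.1 ∈ pvL8) := by
  induction cs generalizing n seen per unique buckets with
  | nil => exact ⟨hb, hk, hp, hP⟩
  | cons c cs ih =>
    rw [PySem.List.enumerate_cons, List.foldl_cons, List.foldl_cons]
    by_cases h1 : (c.2 == "" || PySem.Set.contains seen c.2) = true
    · have eA : pvStepA (seen, per, unique) (n, c) = (seen, per, unique) := by
        simp only [pvStepA]; rw [if_pos h1]
      have eB : pvStepB (seen, per, buckets) c = (seen, per, buckets) := by
        simp only [pvStepB]; rw [if_pos h1]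
      rw [eA, eB]
      exact ih (n + 1) seen per unique buckets hb hk
        (fun t ht => lt_trans (ho t ht) (by omega)) hp hP
    · by_cases h2 : per.getD c.1 0 ≥ MAX_CANDIDATES_PER_SOURCE
      · have eA : pvStepA (seen, per, unique) (n, c) = (seen, per, unique) := by
          simp only [pvStepA]; rw [if_neg h1, if_pos h2]
        have eB : pvStepB (seen, per, buckets) c = (seen, per, buckets) := by
          simp only [pvStepB]; rw [if_neg h1, if_pos h2]
        rw [eA, eB]
        exact ih (n + 1) seen per unique buckets hb hk
          (fun t ht => lt_trans (ho t ht) (by omega)) hp hP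
      · set q := SOURCE_PRIORITY.getD c.1 99 with hq
        have eA : pvStepA (seen, per, unique) (n, c) =
            (PySem.Set.add seen c.2, per.insert c.1 (per.getD c.1 0 + 1),
             unique ++ [(q, n, c.1, c.2)]) := by
          simp only [pvStepA]; rw [if_neg h1, if_neg h2]
        have eB : pvStepB (seen, per, buckets) c =
            (PySem.Set.add seen c.2, per.insert c.1 (per.getD c.1 0 + 1),
             buckets.modify q [] (fun l => l ++ [(c.1, c.2)])) := by
          simp only [pvStepB]; rw [if_neg h1, if_neg h2]
        rw [eA, eB]
        have hqmem : q ∈ pvL8 := pvPrio_mem c.1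
        apply ih (n + 1)
        · intro p
          rw [PySem.Dict.getD_modify, hb p, List.filter_append, List.filter_singleton]
          by_cases hpq : p = q
          · have hb1 : (((q, n, c.1, c.2) : Int × Int × String × String).1 == p) = true := by
              simp [hpq]
            rw [if_pos hpq, hb1, hpq, hb q]
            simp
          · have hb2 : (((q, n, c.1, c.2) : Int × Int × String × String).1 == p) = false := by
              simp; omega
            rw [if_neg hpq, hb2]
            simp
        · rw [PySem.Dict.keys_modify, PySem.Dict.keys_insert_of_contains, hk]
          rw [PySem.Dict.contains_iff_mem_keys, hk]; exact hqmem
        · intro t ht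
          rcases List.mem_append.mp ht with h | h
          · exact lt_trans (ho t h) (by omega)
          · simp at h; subst h; show n < n + 1; omega
        · rw [List.pairwise_append]
          exact ⟨hp, List.pairwise_singleton _ _, fun a ha b hbm => by simp at hbm; subst hbm; exact ho a ha⟩
        · intro t ht
          rcases List.mem_append.mp ht with h | h
          · exact hP t h
          · simp at h; subst h; exact hqmem

theorem pvMain (candidates : List (String × String)) :
    rank_candidate_urls_py candidates = rank_candidate_urls_py_alt candidates := by
  have hrel := pvLoop_rel candidates 0 PySem.Set.empty PySem.Dict.empty [] pvBuckets0
    (by intro p; simp [pvBuckets0_getD]) pvBuckets0_keys (by simp) (by simp) (by simp)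
  obtain ⟨Hb, Hk, Hp, HP⟩ := hrel
  show (PySem.List.slice
      (PySem.List.sorted2
        ((PySem.List.enumerate candidates).foldl pvStepA
          (PySem.Set.empty, PySem.Dict.empty, [])).2.2
        (fun item => item.1) (fun item => item.2.1)) none (some MAX_DOWNLOAD_CANDIDATES)).map
      (fun t => (t.2.2.1, t.2.2.2)) =
    PySem.List.slice
      ((PySem.List.sorted
        (PySem.Dict.keys (candidates.foldl pvStepB
          (PySem.Set.empty, PySem.Dict.empty, pvBuckets0)).2.2) (fun p => p) false).foldl
        (fun acc p => acc ++ (candidates.foldl pvStepB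
          (PySem.Set.empty, PySem.Dict.empty, pvBuckets0)).2.2.getD p []) [])
      none (some MAX_DOWNLOAD_CANDIDATES)
  rw [Hk]
  have hsortL8 : PySem.List.sorted pvL8 (fun p => p) false = pvL8 := by decide
  rw [hsortL8]
  rw [PySem.List.foldl_append_eq_flatMap, List.nil_append]
  have hBflat : pvL8.flatMap
      (fun p => (candidates.foldl pvStepB (PySem.Set.empty, PySem.Dict.empty, pvBuckets0)).2.2.getD p []) =
      (pvL8.flatMap (fun p =>
        ((PySem.List.enumerate candidates 0).foldl pvStepA
          (PySem.Set.empty, PySem.Dict.empty, [])).2.2.filter (fun t => t.1 == p))).map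
        (fun t => (t.2.2.1, t.2.2.2)) := by
    rw [List.map_flatMap]
    exact List.flatMap_congr (fun p _ => Hb p)
  rw [hBflat, pvSorted2_eq_flatMap _ Hp HP]
  have h4 : (0:Int) ≤ MAX_DOWNLOAD_CANDIDATES := by decide
  rw [PySem.List.slice_to _ h4, PySem.List.slice_to _ h4, List.map_take]

-- ===== VERDICT (by name: the statement is the Claim_ definition above) =====
theorem rank_candidate_urls_py_spec : Claim_equal_rank_candidate_urls_py := by
  intro candidates _
  unfold Spec_rank_candidate_urls_py
  exact pvMain candidates
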